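-- pv_equiv track=rewrite | github.com/fidoman/PyFTN | ftn/addr.py | addr_dif
-- ===== SOURCE A (Python) =====
-- def addr_dif(a, def_a):
--   stop=0
--   r=[None,None,None,None]
--   for i in [0,1,2,3]:
--     if( a[i]!=def_a[i] or stop ):
--       stop=1
--       r[i]=a[i]
--   return tuple(r)
-- ===== SOURCE B (Python) =====
-- def addr_dif(a, def_a):
--   return tuple(a[i] if a[:i+1] != def_a[:i+1] else None for i in range(4))
-- ===== Notes on version B (the rewrite author's own statement) =====
-- stated objective: simpler
-- what changed: Replaces the stateful stop-flag scan with a stateless per-slot rule: slot i is kept iff the length-(i+1) prefixes of a and def_a differ, so no flag and no first-difference search is needed.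
import Mathlib
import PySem

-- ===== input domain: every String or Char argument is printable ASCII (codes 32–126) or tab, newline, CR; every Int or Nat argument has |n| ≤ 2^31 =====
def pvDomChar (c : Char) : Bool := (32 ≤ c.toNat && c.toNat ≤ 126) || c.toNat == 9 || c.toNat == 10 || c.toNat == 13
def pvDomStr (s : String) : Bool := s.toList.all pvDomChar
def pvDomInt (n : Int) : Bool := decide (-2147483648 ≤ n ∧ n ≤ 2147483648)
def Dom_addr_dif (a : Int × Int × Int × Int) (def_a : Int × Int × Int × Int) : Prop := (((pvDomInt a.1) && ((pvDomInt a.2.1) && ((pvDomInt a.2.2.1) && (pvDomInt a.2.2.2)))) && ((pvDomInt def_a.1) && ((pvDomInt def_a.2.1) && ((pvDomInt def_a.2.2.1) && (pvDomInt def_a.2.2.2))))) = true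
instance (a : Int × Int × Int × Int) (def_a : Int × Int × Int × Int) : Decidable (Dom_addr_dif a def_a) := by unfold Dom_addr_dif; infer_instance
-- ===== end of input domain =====

-- B replaces A's stateful stop-flag pass with a stateless per-slot prefix comparison; objective: simpler, same behaviour.
-- ===== PORT A =====
-- Literal port of A: a stop flag threaded through the four indices in order.
def addr_dif (a : Int × Int × Int × Int) (def_a : Int × Int × Int × Int) : Option Int × Option Int × Option Int × Option Int :=
  let stop := false
  let r : Option Int × Option Int × Option Int × Option Int := (none, none, none, none)
  -- i = 0
  let (stop, r) := if a.1 ≠ def_a.1 ∨ stop then (true, (some a.1, r.2.1, r.2.2.1, r.2.2.2)) else (stop, r)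
  -- i = 1
  let (stop, r) := if a.2.1 ≠ def_a.2.1 ∨ stop then (true, (r.1, some a.2.1, r.2.2.1, r.2.2.2)) else (stop, r)
  -- i = 2
  let (stop, r) := if a.2.2.1 ≠ def_a.2.2.1 ∨ stop then (true, (r.1, r.2.1, some a.2.2.1, r.2.2.2)) else (stop, r)
  -- i = 3
  let (_, r) := if a.2.2.2 ≠ def_a.2.2.2 ∨ stop then (true, (r.1, r.2.1, r.2.2.1, some a.2.2.2)) else (stop, r)
  r

-- ===== PORT B =====
-- Port of B: slot i is a[i] iff the length-(i+1) prefixes of a and def_a differ (a[:i+1] != def_a[:i+1]).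
def addr_dif_alt (a : Int × Int × Int × Int) (def_a : Int × Int × Int × Int) : Option Int × Option Int × Option Int × Option Int :=
  let aL : List Int := [a.1, a.2.1, a.2.2.1, a.2.2.2]
  let dL : List Int := [def_a.1, def_a.2.1, def_a.2.2.1, def_a.2.2.2]
  let out := (List.range 4).map (fun i => if aL.take (i+1) ≠ dL.take (i+1) then some (aL.getD i 0) else none)
  (out.getD 0 none, out.getD 1 none, out.getD 2 none, out.getD 3 none)

-- ===== PRECONDITION & SPEC =====
def Spec_addr_dif (a : Int × Int × Int × Int) (def_a : Int × Int × Int × Int) (out : Option Int × Option Int × Option Int × Option Int) : Prop := out = addr_dif_alt a def_a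
instance (a : Int × Int × Int × Int) (def_a : Int × Int × Int × Int) (out : Option Int × Option Int × Option Int × Option Int) : Decidable (Spec_addr_dif a def_a out) := by unfold Spec_addr_dif; infer_instance

-- ===== CLAIM (what is proved, stated in full; the proofs are below) =====
def Claim_equal_addr_dif : Prop := ∀ (a : Int × Int × Int × Int) (def_a : Int × Int × Int × Int), Dom_addr_dif a def_a → Spec_addr_dif a def_a (addr_dif a def_a)

-- ===== VERDICT =====
theorem addr_dif_spec : Claim_equal_addr_dif := by
  intro a def_a _
  obtain ⟨a1, a2, a3, a4⟩ := a
  obtain ⟨d1, d2, d3, d4⟩ := def_a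
  unfold Spec_addr_dif addr_dif addr_dif_alt
  by_cases h1 : a1 = d1 <;> by_cases h2 : a2 = d2 <;> by_cases h3 : a3 = d3 <;>
    by_cases h4 : a4 = d4 <;>
    simp [h1, h2, h3, h4, List.range_succ]
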